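-- pv_equiv track=rewrite | github.com/caringalhipe/cs199aclthesis | poset_utils.py | isPoset
-- ===== SOURCE A (Python) =====
-- def isPoset(P):
--     """
--     Check if the given relation P defines a valid poset.
--
--     Parameters:
--     P (list of tuples): A list of pairs representing the partial order relations.
--
--     Returns:
--     bool: True if P is a valid poset, False otherwise.
--     """
--     V = getVertices(P)
--
--     # Create dictionaries to store predecessors and successors
--     prec = {v: set() for v in V}
--     succ = {v: set() for v in V}
--
--     for a, b in P:
--         succ[a].add(b)
--         prec[b].add(a)
--
--     # Check reflexivity
--     for v in V:
--         if v not in succ[v]: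
--             succ[v].add(v)
--         if v not in prec[v]:
--             prec[v].add(v)
--
--     # Check antisymmetry
--     for a in V:
--         for b in succ[a]:
--             if a != b and a in succ[b]:
--                 return False
--
--     # Check transitivity
--     for a in V:
--         for b in succ[a]:
--             for c in succ[b]:
--                 if c not in succ[a]:
--                     return False
--
--     return True
--
-- def getVertices(P):
--     """
--     Get all unique vertices from the relations in P.
--
--     Parameters:
--     P (list of tuples): A list of pairs representing the partial order relations.
--
--     Returns:
--     list: A list of unique vertices.
--     """
--     return list(set([x for pair in P for x in pair]))
-- ===== SOURCE B (Python) =====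
-- def isPoset(P):
--     # Edge-set re-implementation: one relation set with reflexive closure added,
--     # then edge-vs-edge scans for antisymmetry and transitivity.
--     R = set(P) | {(v, v) for ab in P for v in ab}
--     for (a, b) in R:
--         if a != b and (b, a) in R:
--             return False
--     for (a, b) in R:
--         for (c, d) in R:
--             if b == c and (a, d) not in R:
--                 return False
--     return True
-- ===== Notes on version B (the rewrite author's own statement) =====
-- stated objective: simpler
-- what changed: B drops the per-vertex succ/prec adjacency dicts and the vertex-list loops: it builds one edge set (the relation plus reflexive pairs) and checks antisymmetry and transitivity by scanning edges against edges.
import Mathlib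
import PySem

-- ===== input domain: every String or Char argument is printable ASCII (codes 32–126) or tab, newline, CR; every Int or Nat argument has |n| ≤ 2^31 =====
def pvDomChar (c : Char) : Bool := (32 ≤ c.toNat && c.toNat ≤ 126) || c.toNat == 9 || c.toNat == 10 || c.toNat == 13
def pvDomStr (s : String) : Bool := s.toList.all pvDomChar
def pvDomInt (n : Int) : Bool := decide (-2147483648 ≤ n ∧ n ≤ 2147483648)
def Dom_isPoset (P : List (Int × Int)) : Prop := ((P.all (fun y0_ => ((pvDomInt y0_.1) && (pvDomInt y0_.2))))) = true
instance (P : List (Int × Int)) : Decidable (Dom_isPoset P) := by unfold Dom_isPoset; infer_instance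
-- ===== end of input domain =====

-- B replaces the per-vertex succ/prec adjacency dicts by a single edge set (relation ∪ reflexive
-- pairs) scanned edge-against-edge; objective: simpler. Python-set iteration orders are consumed
-- only through order-independent Boolean scans, so the ports use Set/Dict insertion order.

-- ===== PORT A =====
def getVertices (P : List (Int × Int)) : List Int :=
  -- list(set([x for pair in P for x in pair])); the list is only scanned for a Bool, order immaterial
  PySem.Set.ofList (P.flatMap (fun pair => [pair.1, pair.2]))

def isPoset (P : List (Int × Int)) : Bool :=
  let V := getVertices P
  let prec0 : PySem.Dict Int (PySem.Set Int) :=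
    V.foldl (fun d v => d.insert v PySem.Set.empty) PySem.Dict.empty
  let succ0 : PySem.Dict Int (PySem.Set Int) :=
    V.foldl (fun d v => d.insert v PySem.Set.empty) PySem.Dict.empty
  -- for a, b in P: succ[a].add(b); prec[b].add(a)   (keys always present: endpoints ∈ V)
  let sp :=
    P.foldl (fun (sp : PySem.Dict Int (PySem.Set Int) × PySem.Dict Int (PySem.Set Int)) ab =>
        (sp.1.modify ab.1 PySem.Set.empty (fun s => PySem.Set.add s ab.2),
         sp.2.modify ab.2 PySem.Set.empty (fun s => PySem.Set.add s ab.1)))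
      (succ0, prec0)
  -- reflexivity loop
  let sp2 :=
    V.foldl (fun (sp : PySem.Dict Int (PySem.Set Int) × PySem.Dict Int (PySem.Set Int)) v =>
        let sp := if (PySem.Set.contains (sp.1.getD v PySem.Set.empty) v) then sp
                  else (sp.1.modify v PySem.Set.empty (fun s => PySem.Set.add s v), sp.2)
        if (PySem.Set.contains (sp.2.getD v PySem.Set.empty) v) then sp
        else (sp.1, sp.2.modify v PySem.Set.empty (fun s => PySem.Set.add s v)))
      sp
  let succ := sp2.1
  -- antisymmetry, then transitivity (early return False = Boolean all)
  (V.all fun a => (succ.getD a PySem.Set.empty).all fun b =>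
      !(a != b && PySem.Set.contains (succ.getD b PySem.Set.empty) a)) &&
  (V.all fun a => (succ.getD a PySem.Set.empty).all fun b =>
      (succ.getD b PySem.Set.empty).all fun c =>
        PySem.Set.contains (succ.getD a PySem.Set.empty) c)

-- ===== PORT B =====
def isPoset_alt (P : List (Int × Int)) : Bool :=
  let R : PySem.Set (Int × Int) :=
    PySem.Set.union (PySem.Set.ofList P)
      (PySem.Set.ofList (P.flatMap (fun ab => [(ab.1, ab.1), (ab.2, ab.2)])))
  (R.all fun e => !(e.1 != e.2 && PySem.Set.contains R (e.2, e.1))) &&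
  (R.all fun e => R.all fun f =>
      !(e.2 == f.1 && !(PySem.Set.contains R (e.1, f.2))))

-- ===== PRECONDITION & SPEC =====
def Spec_isPoset (P : List (Int × Int)) (out : Bool) : Prop := out = isPoset_alt P
instance (P : List (Int × Int)) (out : Bool) : Decidable (Spec_isPoset P out) := by unfold Spec_isPoset; infer_instance

-- ===== CLAIM (what is proved, stated in full; the proofs are below) =====
def Claim_equal_isPoset : Prop := ∀ (P : List (Int × Int)), Dom_isPoset P → Spec_isPoset P (isPoset P)

-- ===== LEMMAS AND PROOFS =====

-- the semantic relation both programs decide about: (a,b) ∈ P or a forced reflexive pair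
def pvRel (P : List (Int × Int)) (a b : Int) : Prop :=
  (a, b) ∈ P ∨ (a = b ∧ ∃ ab ∈ P, a = ab.1 ∨ a = ab.2)

-- A's final succ dict, named (defeq to the let-chain inside isPoset)
def pvSuccD (P : List (Int × Int)) : PySem.Dict Int (PySem.Set Int) :=
  ((getVertices P).foldl (fun sp v =>
      let sp := if (PySem.Set.contains (sp.1.getD v PySem.Set.empty) v) then sp
                else (sp.1.modify v PySem.Set.empty (fun s => PySem.Set.add s v), sp.2)
      if (PySem.Set.contains (sp.2.getD v PySem.Set.empty) v) then sp
      else (sp.1, sp.2.modify v PySem.Set.empty (fun s => PySem.Set.add s v)))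
    (P.foldl (fun sp ab =>
        (sp.1.modify ab.1 PySem.Set.empty (fun s => PySem.Set.add s ab.2),
         sp.2.modify ab.2 PySem.Set.empty (fun s => PySem.Set.add s ab.1)))
      ((getVertices P).foldl (fun d v => d.insert v PySem.Set.empty) PySem.Dict.empty,
       (getVertices P).foldl (fun d v => d.insert v PySem.Set.empty) PySem.Dict.empty))).1

-- B's edge set, named (defeq to the let inside isPoset_alt)
def pvR (P : List (Int × Int)) : PySem.Set (Int × Int) :=
  PySem.Set.union (PySem.Set.ofList P)
    (PySem.Set.ofList (P.flatMap (fun ab => [(ab.1, ab.1), (ab.2, ab.2)])))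

theorem isPoset_unfold (P : List (Int × Int)) :
    isPoset P =
    (((getVertices P).all fun a => ((pvSuccD P).getD a PySem.Set.empty).all fun b =>
        !(a != b && PySem.Set.contains ((pvSuccD P).getD b PySem.Set.empty) a)) &&
     ((getVertices P).all fun a => ((pvSuccD P).getD a PySem.Set.empty).all fun b =>
        ((pvSuccD P).getD b PySem.Set.empty).all fun c =>
          PySem.Set.contains ((pvSuccD P).getD a PySem.Set.empty) c)) := rfl

theorem isPoset_alt_unfold (P : List (Int × Int)) :
    isPoset_alt P =
    (((pvR P).all fun e => !(e.1 != e.2 && PySem.Set.contains (pvR P) (e.2, e.1))) &&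
     ((pvR P).all fun e => (pvR P).all fun f =>
        !(e.2 == f.1 && !(PySem.Set.contains (pvR P) (e.1, f.2))))) := rfl

theorem mem_getVertices (P : List (Int × Int)) (x : Int) :
    x ∈ getVertices P ↔ ∃ ab ∈ P, x = ab.1 ∨ x = ab.2 := by
  simp [getVertices, PySem.Set.mem_ofList, List.mem_flatMap]

-- the initial dicts map everything to the empty set
theorem getD_init (V : List Int) (a : Int) :
    ((V.foldl (fun d v => d.insert v PySem.Set.empty) PySem.Dict.empty).getD a
      (PySem.Set.empty : PySem.Set Int)) = PySem.Set.empty := by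
  induction V using List.reverseRecOn with
  | nil => simp [PySem.Dict.getD_empty]
  | append_singleton l v ih =>
    simp only [List.foldl_append, List.foldl_cons, List.foldl_nil, PySem.Dict.getD_insert]
    split_ifs with h
    · rfl
    · exact ih

-- first projection of the edge-loop fold
theorem edge_fold_fst (P : List (Int × Int))
    (sp : PySem.Dict Int (PySem.Set Int) × PySem.Dict Int (PySem.Set Int)) :
    (P.foldl (fun sp ab =>
        (sp.1.modify ab.1 PySem.Set.empty (fun s => PySem.Set.add s ab.2),
         sp.2.modify ab.2 PySem.Set.empty (fun s => PySem.Set.add s ab.1))) sp).1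
    = P.foldl (fun d ab => d.modify ab.1 PySem.Set.empty (fun s => PySem.Set.add s ab.2)) sp.1 := by
  induction P generalizing sp with
  | nil => rfl
  | cons ab t ih => simp only [List.foldl_cons]; exact ih _

theorem mem_getD_edge_fold (P : List (Int × Int)) (d : PySem.Dict Int (PySem.Set Int))
    (a b : Int) :
    b ∈ (P.foldl (fun d ab => d.modify ab.1 PySem.Set.empty (fun s => PySem.Set.add s ab.2)) d).getD a PySem.Set.empty
    ↔ b ∈ d.getD a PySem.Set.empty ∨ (a, b) ∈ P := by
  induction P generalizing d with
  | nil => simp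
  | cons ab t ih =>
    simp only [List.foldl_cons, ih, PySem.Dict.getD_modify, List.mem_cons]
    split_ifs with h
    · subst h
      simp [PySem.Set.mem_add, Prod.ext_iff]
      tauto
    · have hne : (a, b) ≠ ab := fun he => h (by rw [← he])
      tauto

-- first projection of the reflexivity fold
theorem refl_fold_fst (V : List Int)
    (sp : PySem.Dict Int (PySem.Set Int) × PySem.Dict Int (PySem.Set Int)) :
    (V.foldl (fun sp v =>
        let sp := if (PySem.Set.contains (sp.1.getD v PySem.Set.empty) v) then sp
                  else (sp.1.modify v PySem.Set.empty (fun s => PySem.Set.add s v), sp.2)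
        if (PySem.Set.contains (sp.2.getD v PySem.Set.empty) v) then sp
        else (sp.1, sp.2.modify v PySem.Set.empty (fun s => PySem.Set.add s v))) sp).1
    = V.foldl (fun d v => if (PySem.Set.contains (d.getD v PySem.Set.empty) v) then d
                          else d.modify v PySem.Set.empty (fun s => PySem.Set.add s v)) sp.1 := by
  induction V generalizing sp with
  | nil => rfl
  | cons v t ih =>
    simp only [List.foldl_cons]
    rw [ih]
    congr 1
    split_ifs <;> rfl

theorem mem_getD_refl_fold (V : List Int) (d : PySem.Dict Int (PySem.Set Int)) (a b : Int) :
    b ∈ (V.foldl (fun d v => if (PySem.Set.contains (d.getD v PySem.Set.empty) v) then d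
                             else d.modify v PySem.Set.empty (fun s => PySem.Set.add s v)) d).getD a PySem.Set.empty
    ↔ b ∈ d.getD a PySem.Set.empty ∨ (a = b ∧ a ∈ V) := by
  induction V generalizing d with
  | nil => simp
  | cons v t ih =>
    simp only [List.foldl_cons, ih, List.mem_cons]
    split_ifs with h
    · rw [PySem.Set.contains_iff] at h
      constructor
      · rintro (h1 | h2)
        · exact Or.inl h1
        · exact Or.inr ⟨h2.1, Or.inr h2.2⟩
      · rintro (h1 | ⟨he, hv | hv⟩)
        · exact Or.inl h1
        · subst he; subst hv; exact Or.inl h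
        · exact Or.inr ⟨he, hv⟩
    · simp only [PySem.Dict.getD_modify]
      split_ifs with hav
      · subst hav
        simp only [PySem.Set.mem_add]
        tauto
      · tauto

-- characterisation of A's final succ dict
theorem mem_pvSuccD (P : List (Int × Int)) (a b : Int) :
    b ∈ (pvSuccD P).getD a PySem.Set.empty ↔ pvRel P a b := by
  unfold pvSuccD
  rw [refl_fold_fst, mem_getD_refl_fold, edge_fold_fst]
  dsimp only
  rw [mem_getD_edge_fold, getD_init]
  simp [pvRel, mem_getVertices]

-- membership in B's edge set R
theorem mem_pvR (P : List (Int × Int)) (e : Int × Int) :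
    e ∈ pvR P ↔ pvRel P e.1 e.2 := by
  obtain ⟨e1, e2⟩ := e
  unfold pvR
  rw [PySem.Set.mem_union, PySem.Set.mem_ofList, PySem.Set.mem_ofList, List.mem_flatMap]
  unfold pvRel
  constructor
  · rintro (h | ⟨⟨x, y⟩, hm, he⟩)
    · exact Or.inl h
    · simp only [List.mem_cons, List.not_mem_nil, or_false, Prod.mk.injEq] at he
      rcases he with ⟨h1, h2⟩ | ⟨h1, h2⟩
      · exact Or.inr ⟨h1.trans h2.symm, ⟨(x, y), hm, Or.inl h1⟩⟩
      · exact Or.inr ⟨h1.trans h2.symm, ⟨(x, y), hm, Or.inr h1⟩⟩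
  · rintro (h | ⟨he, ⟨x, y⟩, hm, hv⟩)
    · exact Or.inl h
    · dsimp only at he hv
      subst he
      refine Or.inr ⟨(x, y), hm, ?_⟩
      simp only [List.mem_cons, List.not_mem_nil, or_false]
      rcases hv with hv | hv <;> subst hv
      · exact Or.inl rfl
      · exact Or.inr rfl

theorem pvRel_endpoints (P : List (Int × Int)) (a b : Int) (h : pvRel P a b) :
    (∃ ab ∈ P, a = ab.1 ∨ a = ab.2) ∧ (∃ ab ∈ P, b = ab.1 ∨ b = ab.2) := by
  rcases h with h | ⟨he, hv⟩
  · exact ⟨⟨(a, b), h, Or.inl rfl⟩, ⟨(a, b), h, Or.inr rfl⟩⟩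
  · subst he; exact ⟨hv, hv⟩

-- ===== VERDICT (by name: the statement is the Claim_ definition above) =====
theorem isPoset_spec : Claim_equal_isPoset := by
  intro P _
  show isPoset P = isPoset_alt P
  rw [isPoset_unfold, isPoset_alt_unfold, Bool.eq_iff_iff]
  simp only [Bool.and_eq_true, List.all_eq_true, PySem.Set.contains_iff,
    mem_pvSuccD, mem_pvR, mem_getVertices, Bool.not_eq_true', ne_eq, Bool.eq_false_iff]
  constructor
  · rintro ⟨h1, h2⟩
    constructor
    · rintro ⟨a, b⟩ hr
      exact h1 a (pvRel_endpoints P a b hr).1 b hr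
    · rintro ⟨a, b⟩ hab ⟨c, d⟩ hcd ⟨hbc, hnr⟩
      have hbc' : b = c := by simpa using hbc
      subst hbc'
      exact hnr (h2 a (pvRel_endpoints P a b hab).1 b hab d hcd)
  · rintro ⟨h1, h2⟩
    constructor
    · intro a _ b hr
      exact h1 (a, b) hr
    · intro a _ b hab c hbc
      by_contra hn
      exact h2 (a, b) hab (b, c) hbc ⟨by simp, hn⟩
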